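-- pv_equiv track=rewrite | github.com/ferryman-charon/Advent-of-code-2024 | 2024/Aoc_2024_D03.py | ext_memory_ops
-- ===== SOURCE A (Python) =====
-- def digit_len(text:str, index:int, first:bool)-> int:
--     j = 0
--     while True:
--         if index + j + 1 > len(text):
--             return 0
--         if text[index + j].isdigit():
--             j += 1
--         else:
--             if first and text[index +j] == ',':
--                 return j + 1
--             elif not first and text[index +j] == ')':
--                 return j + 1
--             else:
--                 return 0
--
-- def ext_memory_ops(text:str)->int:
--     result = 0
--     i = 0
--     operate = True
--     while i < len(text):
--         if text[i:i+4] == 'mul(':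
--             i += 4
--
--             l1 = digit_len(text,i, True)
--             if not l1: continue
--
--             l2 = digit_len(text, i+l1, False)
--             if not l2: continue
--
--             if operate:
--                 result += int(text[i:i+l1-1])*int(text[i+l1:i+l1+l2-1])
--             i += (l1+l2)
--         elif text[i:i+4] == 'do()':
--             operate = True
--             i += 4
--         elif text[i:i+7] == "don't()":
--             operate = False
--             i += 7
--         else:
--             i+=1
--
--     return result
-- ===== SOURCE B (Python) =====
-- def ext_memory_ops(text: str) -> int:
--     # Right-to-left single pass: `s` holds the digit-string pairs of mul()s whose
--     # governing control token (the nearest do()/don't() on their left) has not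
--     # been seen yet; a do() commits them (converting with int only then), a
--     # don't() discards them; what remains at the left edge is governed by the
--     # initial enabled state (True).
--     t = 0
--     s = []
--     n = len(text)
--     for i in range(n - 1, -1, -1):
--         if text.startswith("do()", i):
--             t += sum(int(a) * int(b) for a, b in s)
--             s = []
--         elif text.startswith("don't()", i):
--             s = []
--         elif text.startswith("mul(", i):
--             k = i + 4
--             while k < n and text[k].isdigit():
--                 k += 1
--             if k < n and text[k] == ',':
--                 k2 = k + 1
--                 while k2 < n and text[k2].isdigit():
--                     k2 += 1
--                 if k2 < n and text[k2] == ')':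
--                     s.append((text[i + 4:k], text[k + 1:k2]))
--     return t + sum(int(a) * int(b) for a, b in s)
-- ===== Notes on version B (the rewrite author's own statement) =====
-- stated objective: alternative
-- what changed: B replaces A's forward index-jumping cursor state machine (with its shared two-mode digit_len helper and continue-driven control flow) by a single right-to-left pass that defers each mul()'s digit-string pair to the nearest control token on its left: do() commits the pending pairs (converting with int only then), don't() discards them, and what remains at the left edge is governed by the initial enabled state.
import Mathlib
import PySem

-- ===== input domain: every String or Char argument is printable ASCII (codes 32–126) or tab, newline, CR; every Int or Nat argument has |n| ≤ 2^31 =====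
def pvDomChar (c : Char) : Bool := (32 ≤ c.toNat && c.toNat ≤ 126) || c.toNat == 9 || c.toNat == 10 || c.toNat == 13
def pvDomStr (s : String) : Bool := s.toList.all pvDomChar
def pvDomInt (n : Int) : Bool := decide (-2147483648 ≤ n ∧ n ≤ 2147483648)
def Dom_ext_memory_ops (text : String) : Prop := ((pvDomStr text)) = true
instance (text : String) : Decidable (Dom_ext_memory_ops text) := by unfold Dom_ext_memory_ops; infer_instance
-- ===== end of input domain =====

-- B replaces A's forward cursor state machine (manual index jumps, a shared two-mode
-- digit_len helper) by a single right-to-left pass that defers each mul()'s digit-string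
-- pair to the nearest control token on its left (objective: alternative, same cost).

-- ===== PORT A =====
-- A's digit_len: the `while True` loop; the structural fuel argument only makes the
-- loop total (cs.length + 1 steps always suffice from the 0 <= index call sites), it
-- changes no computed value.  All call sites have 0 <= index, and the bound check
-- guarantees index + j < len before the character is read, so `pyGetD ... ' '` is
-- exactly Python's text[index + j] here.
def digitLenGo (cs : List Char) (index : Int) (first : Bool) (j : Int) : Nat → Int
  | 0 => 0
  | fuel + 1 =>
    if index + j + 1 > (cs.length : Int) then 0
    else
      if PySem.Chars.isdigit (PySem.List.pyGetD cs (index + j) ' ') then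
        digitLenGo cs index first (j + 1) fuel
      else if first ∧ PySem.List.pyGetD cs (index + j) ' ' = ',' then j + 1
      else if (¬ first) ∧ PySem.List.pyGetD cs (index + j) ' ' = ')' then j + 1
      else 0

def digit_len (cs : List Char) (index : Int) (first : Bool) : Int :=
  digitLenGo cs index first 0 (cs.length + 1)

-- A's main while loop, recursing on i (fuel as above: the loop advances i by at
-- least 1 per step, so cs.length + 1 steps suffice from i = 0).  int(...) on a slice
-- is `(PySem.Int.ofChars? …).getD 0`: inside Pre_ the slice is nonempty digits, so
-- ofChars? is some and the default is never taken (outside Pre_ Python raises).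
def emoGo (cs : List Char) (i : Int) (operate : Bool) (result : Int) : Nat → Int
  | 0 => result
  | fuel + 1 =>
    if i < (cs.length : Int) then
      if PySem.List.slice cs (some i) (some (i + 4)) = ['m', 'u', 'l', '('] then
        let l1 := digit_len cs (i + 4) true
        if l1 = 0 then emoGo cs (i + 4) operate result fuel
        else
          let l2 := digit_len cs (i + 4 + l1) false
          if l2 = 0 then emoGo cs (i + 4) operate result fuel
          else
            let result' :=
              if operate then
                result +
                  (PySem.Int.ofChars? (PySem.List.slice cs (some (i + 4)) (some (i + 4 + l1 - 1)))).getD 0 *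
                  (PySem.Int.ofChars? (PySem.List.slice cs (some (i + 4 + l1)) (some (i + 4 + l1 + l2 - 1)))).getD 0
              else result
            emoGo cs (i + 4 + l1 + l2) operate result' fuel
      else if PySem.List.slice cs (some i) (some (i + 4)) = ['d', 'o', '(', ')'] then
        emoGo cs (i + 4) true result fuel
      else if PySem.List.slice cs (some i) (some (i + 7)) = ['d', 'o', 'n', '\'', 't', '(', ')'] then
        emoGo cs (i + 7) false result fuel
      else emoGo cs (i + 1) operate result fuel
    else result

def ext_memory_ops (text : String) : Int :=
  emoGo text.toList 0 true 0 (text.toList.length + 1)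

-- ===== PORT B =====
-- B's `sum(int(a) * int(b) for a, b in s)` over the pending digit-string pairs
-- (int as getD 0, never taken inside Pre_, exactly as in port A).
def sumProd (s : List (List Char × List Char)) : Int :=
  s.foldl (fun acc p =>
    acc + (PySem.Int.ofChars? p.1).getD 0 * (PySem.Int.ofChars? p.2).getD 0) 0

-- B's inner `while k < n and text[k].isdigit(): k += 1` loop (fuel as above; all
-- call sites have 0 <= k, so pyGetD is Python's text[k]).
def runEnd (cs : List Char) (k : Int) : Nat → Int
  | 0 => k
  | fuel + 1 =>
    if k < (cs.length : Int) ∧ PySem.Chars.isdigit (PySem.List.pyGetD cs k ' ') then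
      runEnd cs (k + 1) fuel
    else k

-- B's loop body at position i on the state (t, s); text.startswith(p, i) with
-- 0 <= i is exactly text[i:i+len(p)] == p.
def bStep (cs : List Char) (i : Int) (ts : Int × List (List Char × List Char)) :
    Int × List (List Char × List Char) :=
  if PySem.List.slice cs (some i) (some (i + 4)) = ['d', 'o', '(', ')'] then
    (ts.1 + sumProd ts.2, [])
  else if PySem.List.slice cs (some i) (some (i + 7)) = ['d', 'o', 'n', '\'', 't', '(', ')'] then
    (ts.1, [])
  else if PySem.List.slice cs (some i) (some (i + 4)) = ['m', 'u', 'l', '('] then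
    let k := runEnd cs (i + 4) (cs.length + 1)
    if k < (cs.length : Int) ∧ PySem.List.pyGetD cs k ' ' = ',' then
      let k2 := runEnd cs (k + 1) (cs.length + 1)
      if k2 < (cs.length : Int) ∧ PySem.List.pyGetD cs k2 ' ' = ')' then
        (ts.1, ts.2 ++ [(PySem.List.slice cs (some (i + 4)) (some k),
                         PySem.List.slice cs (some (k + 1)) (some k2))])
      else ts
    else ts
  else ts

-- B's `for i in range(n - 1, -1, -1)` loop (fuel: n + 1 iterations suffice).
def bLoop (cs : List Char) (i : Int) (ts : Int × List (List Char × List Char)) :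
    Nat → Int × List (List Char × List Char)
  | 0 => ts
  | fuel + 1 => if 0 ≤ i then bLoop cs (i - 1) (bStep cs i ts) fuel else ts

def ext_memory_ops_alt (text : String) : Int :=
  let ts := bLoop text.toList ((text.toList.length : Int) - 1) (0, []) (text.toList.length + 1)
  ts.1 + sumProd ts.2

-- ===== PRECONDITION & SPEC =====
-- A full mul(<digits>,<digits>) match (A's greedy grammar) with an EMPTY digit
-- group at position i: there Python calls int on that empty digit string and raises.
def pvMulBad (cs : List Char) (i : Nat) : Bool :=
  decide ((cs.drop i).take 4 = ['m', 'u', 'l', '(']) &&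
    (let rest := cs.drop (i + 4)
     let d1 := rest.takeWhile PySem.Chars.isdigit
     let r1 := rest.drop d1.length
     decide (r1.head? = some ',') &&
       (let rest2 := r1.tail
        let d2 := rest2.takeWhile PySem.Chars.isdigit
        let r2 := rest2.drop d2.length
        decide (r2.head? = some ')') && (d1.isEmpty || d2.isEmpty)))

def pvStarts (cs : List Char) (j : Nat) (p : List Char) : Bool :=
  decide ((cs.drop j).take p.length = p)

-- Textual enabled state at position i: enabled unless the nearest do()/don't()
-- token starting strictly before i is a don't().
def pvEnabled (cs : List Char) (i : Nat) : Bool :=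
  decide (∀ j < i, pvStarts cs j ['d', 'o', 'n', '\'', 't', '(', ')'] = true →
    ∃ k < i, j < k ∧ pvStarts cs k ['d', 'o', '(', ')'] = true)

-- Pre_ excludes exactly the texts containing a full mul(<digits>,<digits>) match with
-- an empty digit group in enabled state (no nearer don't() than do() on its left):
-- on precisely those inputs Python A raises ValueError (int on an empty digit string) — and B raises the
-- same ValueError there when the pending pair is committed.
def Pre_ext_memory_ops (text : String) : Prop :=
  ∀ i < text.toList.length, pvMulBad text.toList i = true → pvEnabled text.toList i = false

instance (text : String) : Decidable (Pre_ext_memory_ops text) := by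
  unfold Pre_ext_memory_ops; infer_instance

def pvWitness_ext_memory_ops : String := "mul(2,3)don't()mul(4,5)do()mul(6,7)"

def Spec_ext_memory_ops (text : String) (out : Int) : Prop := out = ext_memory_ops_alt text
instance (text : String) (out : Int) : Decidable (Spec_ext_memory_ops text out) := by
  unfold Spec_ext_memory_ops; infer_instance

-- ===== CLAIM (what is proved, stated in full; the proofs are below) =====
def Claim_equal_ext_memory_ops : Prop := ∀ (text : String), Dom_ext_memory_ops text → Pre_ext_memory_ops text → Spec_ext_memory_ops text (ext_memory_ops text)

-- ===== LEMMAS AND PROOFS =====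

-- Proof-side TOTAL (well-founded) twins of the fuel loops, plus adequacy lemmas
-- showing the ports' fuel is always sufficient.
def runEndT (cs : List Char) (k : Int) : Int :=
  if k < (cs.length : Int) ∧ PySem.Chars.isdigit (PySem.List.pyGetD cs k ' ') then
    runEndT cs (k + 1)
  else k
termination_by ((cs.length : Int) - k).toNat
decreasing_by omega

def digitLenGoT (cs : List Char) (index : Int) (first : Bool) (j : Int) : Int :=
  if index + j + 1 > (cs.length : Int) then 0
  else
    if PySem.Chars.isdigit (PySem.List.pyGetD cs (index + j) ' ') then
      digitLenGoT cs index first (j + 1)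
    else if first ∧ PySem.List.pyGetD cs (index + j) ' ' = ',' then j + 1
    else if (¬ first) ∧ PySem.List.pyGetD cs (index + j) ' ' = ')' then j + 1
    else 0
termination_by ((cs.length : Int) - index - j).toNat
decreasing_by omega

def digitLenGoT0 (cs : List Char) (index : Int) (first : Bool) : Int :=
  digitLenGoT cs index first 0

theorem runEndT_fuel (cs : List Char) : ∀ (fuel : Nat) (k : Int),
    ((cs.length : Int) - k).toNat < fuel → runEnd cs k fuel = runEndT cs k := by
  intro fuel
  induction fuel with
  | zero => intro k h; exact absurd h (by omega)
  | succ fuel ih =>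
      intro k h
      show (if _ then runEnd cs (k + 1) fuel else k) = _
      conv_rhs => rw [runEndT]
      by_cases hc : k < (cs.length : Int) ∧
          PySem.Chars.isdigit (PySem.List.pyGetD cs k ' ') = true
      · rw [if_pos hc, if_pos hc, ih (k + 1) (by omega)]
      · rw [if_neg hc, if_neg hc]

theorem digitLenGo_fuel (cs : List Char) (first : Bool) : ∀ (fuel : Nat) (index j : Int),
    ((cs.length : Int) - index - j).toNat < fuel →
    digitLenGo cs index first j fuel = digitLenGoT cs index first j := by
  intro fuel
  induction fuel with
  | zero => intro index j h; exact absurd h (by omega)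
  | succ fuel ih =>
      intro index j h
      show (if _ then (0 : Int) else _) = _
      conv_rhs => rw [digitLenGoT]
      by_cases h1 : index + j + 1 > (cs.length : Int)
      · rw [if_pos h1, if_pos h1]
      · rw [if_neg h1, if_neg h1]
        by_cases h2 : PySem.Chars.isdigit (PySem.List.pyGetD cs (index + j) ' ') = true
        · rw [if_pos h2, if_pos h2, ih index (j + 1) (by omega)]
        · rw [if_neg h2, if_neg h2]

theorem digit_len_T (cs : List Char) (index : Int) (first : Bool) (h : 0 ≤ index) :
    digit_len cs index first = digitLenGoT0 cs index first := by
  unfold digit_len digitLenGoT0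
  exact digitLenGo_fuel cs first (cs.length + 1) index 0 (by omega)

-- The value of B's backward loop on the suffix starting at i (proof-side view of
-- bLoop: the non-tail-recursive reading of the right-to-left pass).
def sfB (cs : List Char) (i : Int) : Int × List (List Char × List Char) :=
  if 0 ≤ i ∧ i < (cs.length : Int) then bStep cs i (sfB cs (i + 1)) else (0, [])
termination_by ((cs.length : Int) - i).toNat
decreasing_by omega

-- The total A's forward machine extracts from a suffix value, given the incoming
-- operate flag: the committed part, plus the pending part when enabled.
def tvB (op : Bool) (ts : Int × List (List Char × List Char)) : Int :=
  if op then ts.1 + sumProd ts.2 else ts.1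

theorem sumProd_append (s : List (List Char × List Char)) (p : List Char × List Char) :
    sumProd (s ++ [p]) = sumProd s +
      (PySem.Int.ofChars? p.1).getD 0 * (PySem.Int.ofChars? p.2).getD 0 := by
  simp [sumProd, List.foldl_append]

theorem runEndT_ge (cs : List Char) (k : Int) : k ≤ runEndT cs k := by
  induction k using runEndT.induct (cs := cs) with
  | case1 k h ih => unfold runEndT; rw [if_pos h]; omega
  | case2 k h => unfold runEndT; rw [if_neg h]

theorem runEndT_digits (cs : List Char) (k q : Int) (h1 : k ≤ q) (h2 : q < runEndT cs k) :
    PySem.Chars.isdigit (PySem.List.pyGetD cs q ' ') = true := by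
  revert h1 h2
  induction k using runEndT.induct (cs := cs) with
  | case1 k h ih =>
      intro h1 h2
      unfold runEndT at h2; rw [if_pos h] at h2
      by_cases hq : q = k
      · subst hq; exact h.2
      · exact ih (by omega) h2
  | case2 k h =>
      intro h1 h2
      unfold runEndT at h2; rw [if_neg h] at h2; omega

theorem dl_runEndT (cs : List Char) (first : Bool) (index j : Int) :
    digitLenGoT cs index first j =
      if runEndT cs (index + j) < (cs.length : Int) ∧
          PySem.List.pyGetD cs (runEndT cs (index + j)) ' ' = (if first then ',' else ')') then
        runEndT cs (index + j) - index + 1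
      else 0 := by
  induction j using digitLenGoT.induct (cs := cs) (index := index) (first := first) with
  | case1 j h =>
      unfold digitLenGoT; rw [if_pos h]
      have hre : runEndT cs (index + j) = index + j := by
        unfold runEndT; rw [if_neg (by intro hc; omega)]
      rw [hre, if_neg (by intro hc; omega)]
  | case2 j h hdig ih =>
      unfold digitLenGoT; rw [if_neg h, if_pos hdig]
      have hre : runEndT cs (index + j) = runEndT cs (index + j + 1) := by
        conv_lhs => unfold runEndT
        rw [if_pos ⟨by omega, hdig⟩]
      rw [ih, hre, add_assoc]
  | case3 j h hdig h1 =>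
      unfold digitLenGoT; rw [if_neg h, if_neg hdig, if_pos h1]
      have hre : runEndT cs (index + j) = index + j := by
        unfold runEndT; rw [if_neg (fun hc => hdig hc.2)]
      rw [hre, h1.1, if_pos ⟨by omega, by simp [h1.2]⟩]
      omega
  | case4 j h hdig h1 h2 =>
      unfold digitLenGoT; rw [if_neg h, if_neg hdig, if_neg h1, if_pos h2]
      have hre : runEndT cs (index + j) = index + j := by
        unfold runEndT; rw [if_neg (fun hc => hdig hc.2)]
      have hf : first = false := by
        cases hfb : first
        · rfl
        · exact absurd h2.1 (by simp [hfb])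
      rw [hre, hf, if_pos ⟨by omega, by simp [h2.2]⟩]
      omega
  | case5 j h hdig h1 h2 =>
      unfold digitLenGoT; rw [if_neg h, if_neg hdig, if_neg h1, if_neg h2]
      have hre : runEndT cs (index + j) = index + j := by
        unfold runEndT; rw [if_neg (fun hc => hdig hc.2)]
      rw [hre, if_neg]
      intro hc
      cases hfb : first
      · exact h2 ⟨by simp [hfb], by simpa [hfb] using hc.2⟩
      · exact h1 ⟨hfb, by simpa [hfb] using hc.2⟩

theorem slice_eq_drop_take (cs : List Char) (i : Int) (hi : 0 ≤ i) (k : Nat) :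
    PySem.List.slice cs (some i) (some (i + (k : Int))) = (cs.drop i.toNat).take k := by
  rw [PySem.List.slice_toNat cs hi (by omega)]
  congr 1
  omega

theorem drop_decomp (cs : List Char) (m : Nat) (l : List Char) (h : (cs.drop m).take l.length = l) :
    cs.drop m = l ++ cs.drop (m + l.length) := by
  conv_lhs => rw [← List.take_append_drop l.length (cs.drop m)]
  rw [h, List.drop_drop]

theorem pyGetD_drop (cs : List Char) (i : Int) (hi : 0 ≤ i) (j : Nat) (c : Char) (l : List Char)
    (h : cs.drop i.toNat = l ++ cs.drop (i.toNat + l.length)) (hj : l[j]? = some c) :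
    PySem.List.pyGetD cs (i + (j : Int)) ' ' = c := by
  have hjl : j < l.length := by
    by_contra hc
    rw [List.getElem?_eq_none (by omega)] at hj
    simp at hj
  have hget : cs[i.toNat + j]? = some c := by
    rw [← List.getElem?_drop, h, List.getElem?_append_left hjl, hj]
  obtain ⟨hlen, hv⟩ := List.getElem?_eq_some_iff.mp hget
  rw [PySem.List.pyGetD_eq_getElem cs ' ' (by omega) (by omega)]
  have ht : (i + (j : Int)).toNat = i.toNat + j := by omega
  simp only [ht]
  exact hv

theorem slice_head (cs : List Char) (i b : Int) (hi : 0 ≤ i) (hb : 0 ≤ b) (c : Char)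
    (l : List Char) (h : PySem.List.slice cs (some i) (some b) = c :: l) :
    PySem.List.pyGetD cs i ' ' = c := by
  rw [PySem.List.slice_toNat cs hi hb] at h
  rcases hdrop : cs.drop i.toNat with _ | ⟨a, t⟩
  · rw [hdrop, List.take_nil] at h
    simp at h
  · rw [hdrop] at h
    rcases hk : b.toNat - i.toNat with _ | k
    · rw [hk, List.take_zero] at h
      simp at h
    · rw [hk, List.take_succ_cons] at h
      have hac : a = c := ((List.cons.injEq _ _ _ _).mp h).1
      have hlen : i.toNat < cs.length := by
        have hl := congrArg List.length hdrop
        simp [List.length_drop] at hl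
        omega
      have hg : cs[i.toNat + 0]? = some a := by
        rw [← List.getElem?_drop, hdrop]
        rfl
      obtain ⟨hlt, hv⟩ := List.getElem?_eq_some_iff.mp hg
      rw [PySem.List.pyGetD_eq_getElem cs ' ' hi (by omega)]
      rw [← hac]
      simpa using hv

theorem bStep_id (cs : List Char) (i : Int) (hi : 0 ≤ i)
    (hd : PySem.List.pyGetD cs i ' ' ≠ 'd') (hm : PySem.List.pyGetD cs i ' ' ≠ 'm')
    (ts : Int × List (List Char × List Char)) : bStep cs i ts = ts := by
  unfold bStep
  rw [if_neg (fun hc => hd (slice_head cs i (i + 4) hi (by omega) _ _ hc)),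
      if_neg (fun hc => hd (slice_head cs i (i + 7) hi (by omega) _ _ hc)),
      if_neg (fun hc => hm (slice_head cs i (i + 4) hi (by omega) _ _ hc))]

theorem sfB_congr (cs : List Char) (a b : Int) (ha : 0 ≤ a) (hab : a ≤ b)
    (hid : ∀ q, a ≤ q → q < b → ∀ ts, bStep cs q ts = ts) : sfB cs a = sfB cs b := by
  have key : ∀ (n : Nat) (a : Int), 0 ≤ a → a ≤ b → (b - a).toNat = n →
      (∀ q, a ≤ q → q < b → ∀ ts, bStep cs q ts = ts) → sfB cs a = sfB cs b := by
    intro n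
    induction n with
    | zero => intro a _ hab hn _; have : a = b := by omega
              rw [this]
    | succ n ih =>
        intro a ha hab hn hid
        have hlt : a < b := by omega
        by_cases hlen : a < (cs.length : Int)
        · have h1 : sfB cs a = sfB cs (a + 1) := by
            conv_lhs => rw [sfB]
            rw [if_pos ⟨ha, hlen⟩, hid a le_rfl hlt]
          rw [h1]
          exact ih (a + 1) (by omega) (by omega) (by omega)
            (fun q hq1 hq2 => hid q (by omega) hq2)
        · have hbig : ∀ c : Int, (cs.length : Int) ≤ c → sfB cs c = (0, []) := by
            intro c hc
            rw [sfB, if_neg (by intro hcc; omega)]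
          rw [hbig a (by omega), hbig b (by omega)]
  exact key (b - a).toNat a ha hab rfl hid

theorem bLoop_sfB (cs : List Char) : ∀ (fuel : Nat) (i : Int), -1 ≤ i →
    i < (cs.length : Int) → (i + 1).toNat < fuel →
    bLoop cs i (sfB cs (i + 1)) fuel = sfB cs 0 := by
  intro fuel
  induction fuel with
  | zero => intro i h1 h2 hf; exact absurd hf (by omega)
  | succ fuel ih =>
      intro i h1 h2 hf
      show (if _ then bLoop cs (i - 1) (bStep cs i (sfB cs (i + 1))) fuel else _) = _
      by_cases hi0 : 0 ≤ i
      · rw [if_pos hi0]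
        have hs : bStep cs i (sfB cs (i + 1)) = sfB cs i := by
          conv_rhs => rw [sfB]
          rw [if_pos ⟨hi0, h2⟩]
        rw [hs]
        have := ih (i - 1) (by omega) (by omega) (by omega)
        rw [show i - 1 + 1 = i from by omega] at this
        exact this
      · rw [if_neg hi0]
        rw [show i + 1 = 0 from by omega]

theorem alt_eq (text : String) :
    ext_memory_ops_alt text = (sfB text.toList 0).1 + sumProd (sfB text.toList 0).2 := by
  unfold ext_memory_ops_alt
  have h0 : sfB text.toList ((text.toList.length : Int) - 1 + 1) = (0, []) := by
    rw [sfB, if_neg (by intro hc; omega)]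
  rw [← h0, bLoop_sfB text.toList (text.toList.length + 1) _ (by omega) (by omega) (by omega)]

theorem isdigit_ne_d (c : Char) (h : PySem.Chars.isdigit c = true) : c ≠ 'd' := by
  rintro rfl; revert h; decide

theorem isdigit_ne_m (c : Char) (h : PySem.Chars.isdigit c = true) : c ≠ 'm' := by
  rintro rfl; revert h; decide

theorem tvB_pending (op : Bool) (x : Int) : tvB op (x, []) = x := by
  cases op <;> simp [tvB, sumProd]

theorem tvB_nil (op : Bool) : tvB op (0, []) = 0 := by
  cases op <;> simp [tvB, sumProd]

theorem lit_decomp (cs : List Char) (i : Int) (hi : 0 ≤ i) (l : List Char) (k : Nat)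
    (hk : l.length = k)
    (h : PySem.List.slice cs (some i) (some (i + (k : Int))) = l) :
    cs.drop i.toNat = l ++ cs.drop (i.toNat + k) := by
  have h4 := slice_eq_drop_take cs i hi k
  rw [h] at h4
  have := drop_decomp cs i.toNat l (by rw [hk, ← h4])
  rwa [hk] at this

theorem emoGo_sfB (cs : List Char) : ∀ (fuel : Nat) (i : Int) (op : Bool) (r : Int),
    0 ≤ i → ((cs.length : Int) - i).toNat < fuel →
    emoGo cs i op r fuel = r + tvB op (sfB cs i) := by
  intro fuel
  induction fuel with
  | zero => intro i op r hi hf; exact absurd hf (by omega)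
  | succ fuel ih =>
    intro i op r hi hf
    by_cases hlt : i < (cs.length : Int)
    case neg =>
      simp only [emoGo]
      rw [if_neg hlt]
      have hz : sfB cs i = (0, []) := by
        rw [sfB, if_neg (fun hc => hlt hc.2)]
      rw [hz, tvB_nil]
      omega
    case pos =>
    simp only [emoGo]
    rw [if_pos hlt]
    by_cases hmul : PySem.List.slice cs (some i) (some (i + 4)) = ['m', 'u', 'l', '(']
    case pos =>
      rw [if_pos hmul]
      have hdec : cs.drop i.toNat = ['m', 'u', 'l', '('] ++ cs.drop (i.toNat + 4) :=
        lit_decomp cs i hi _ 4 (by decide) (by norm_num; exact hmul)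
      have c0 : PySem.List.pyGetD cs (i + (0 : Nat)) ' ' = 'm' :=
        pyGetD_drop cs i hi 0 'm' _ hdec (by decide)
      have cu : PySem.List.pyGetD cs (i + (1 : Nat)) ' ' = 'u' :=
        pyGetD_drop cs i hi 1 'u' _ hdec (by decide)
      have cl : PySem.List.pyGetD cs (i + (2 : Nat)) ' ' = 'l' :=
        pyGetD_drop cs i hi 2 'l' _ hdec (by decide)
      have cp : PySem.List.pyGetD cs (i + (3 : Nat)) ' ' = '(' :=
        pyGetD_drop cs i hi 3 '(' _ hdec (by decide)
      norm_num at c0 cu cl cp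
      have hKge := runEndT_ge cs (i + 4)
      have hndo : ¬ PySem.List.slice cs (some i) (some (i + 4)) = ['d', 'o', '(', ')'] := by
        rw [hmul]; decide
      have hndont : ¬ PySem.List.slice cs (some i) (some (i + 7)) =
          ['d', 'o', 'n', '\'', 't', '(', ')'] := by
        intro hc
        have hh := slice_head cs i (i + 7) hi (by omega) _ _ hc
        rw [hh] at c0
        exact absurd c0 (by decide)
      have hid3 : ∀ q, i + 1 ≤ q → q < i + 4 → ∀ ts, bStep cs q ts = ts := by
        intro q hq1 hq2 ts
        rcases (by omega : q = i + 1 ∨ q = i + 2 ∨ q = i + 3) with h | h | h <;> subst h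
        · exact bStep_id cs _ (by omega) (by rw [cu]; decide) (by rw [cu]; decide) ts
        · exact bStep_id cs _ (by omega) (by rw [cl]; decide) (by rw [cl]; decide) ts
        · exact bStep_id cs _ (by omega) (by rw [cp]; decide) (by rw [cp]; decide) ts
      have hrE1 : runEnd cs (i + 4) (cs.length + 1) = runEndT cs (i + 4) :=
        runEndT_fuel cs (cs.length + 1) (i + 4) (by omega)
      have hdlT : digit_len cs (i + 4) true = digitLenGoT0 cs (i + 4) true :=
        digit_len_T cs (i + 4) true (by omega)
      have hdl1 : digitLenGoT0 cs (i + 4) true =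
          if runEndT cs (i + 4) < (cs.length : Int) ∧
              PySem.List.pyGetD cs (runEndT cs (i + 4)) ' ' = ',' then
            runEndT cs (i + 4) - (i + 4) + 1
          else 0 := by
        unfold digitLenGoT0
        have hdl := dl_runEndT cs true (i + 4) 0
        rw [add_zero] at hdl
        simpa using hdl
      by_cases hcond1 : runEndT cs (i + 4) < (cs.length : Int) ∧
          PySem.List.pyGetD cs (runEndT cs (i + 4)) ' ' = ','
      case neg =>
        have hl1 : digitLenGoT0 cs (i + 4) true = 0 := by rw [hdl1, if_neg hcond1]
        rw [hdlT, hl1]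
        rw [if_pos rfl]
        have hstep : ∀ ts, bStep cs i ts = ts := by
          intro ts
          simp only [bStep]
          rw [if_neg hndo, if_neg hndont, if_pos hmul, hrE1, if_neg hcond1]
        have hs : sfB cs i = sfB cs (i + 4) := by
          conv_lhs => rw [sfB]
          rw [if_pos ⟨hi, hlt⟩, hstep]
          exact sfB_congr cs (i + 1) (i + 4) (by omega) (by omega) hid3
        rw [ih (i + 4) op r (by omega) (by omega), hs]
      case pos =>
      have hL1 : digitLenGoT0 cs (i + 4) true = runEndT cs (i + 4) - (i + 4) + 1 := by
        rw [hdl1, if_pos hcond1]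
      have hK2ge := runEndT_ge cs (runEndT cs (i + 4) + 1)
      have hrE2 : runEnd cs (runEndT cs (i + 4) + 1) (cs.length + 1) =
          runEndT cs (runEndT cs (i + 4) + 1) :=
        runEndT_fuel cs (cs.length + 1) (runEndT cs (i + 4) + 1) (by omega)
      have hdl2 : digitLenGoT0 cs (runEndT cs (i + 4) + 1) false =
          if runEndT cs (runEndT cs (i + 4) + 1) < (cs.length : Int) ∧
              PySem.List.pyGetD cs (runEndT cs (runEndT cs (i + 4) + 1)) ' ' = ')' then
            runEndT cs (runEndT cs (i + 4) + 1) - (runEndT cs (i + 4) + 1) + 1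
          else 0 := by
        unfold digitLenGoT0
        have hdl := dl_runEndT cs false (runEndT cs (i + 4) + 1) 0
        rw [add_zero] at hdl
        simpa using hdl
      rw [hdlT, hL1]
      rw [if_neg (show ¬ (runEndT cs (i + 4) - (i + 4) + 1 = 0) from by omega)]
      rw [show i + 4 + (runEndT cs (i + 4) - (i + 4) + 1) = runEndT cs (i + 4) + 1 from by ring]
      have hdlT2 : digit_len cs (runEndT cs (i + 4) + 1) false =
          digitLenGoT0 cs (runEndT cs (i + 4) + 1) false :=
        digit_len_T cs (runEndT cs (i + 4) + 1) false (by omega)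
      rw [hdlT2]
      by_cases hcond2 : runEndT cs (runEndT cs (i + 4) + 1) < (cs.length : Int) ∧
          PySem.List.pyGetD cs (runEndT cs (runEndT cs (i + 4) + 1)) ' ' = ')'
      case neg =>
        have hl2 : digitLenGoT0 cs (runEndT cs (i + 4) + 1) false = 0 := by
          rw [hdl2, if_neg hcond2]
        rw [hl2, if_pos rfl]
        have hstep : ∀ ts, bStep cs i ts = ts := by
          intro ts
          simp only [bStep]
          rw [if_neg hndo, if_neg hndont, if_pos hmul, hrE1, if_pos hcond1, hrE2, if_neg hcond2]
        have hs : sfB cs i = sfB cs (i + 4) := by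
          conv_lhs => rw [sfB]
          rw [if_pos ⟨hi, hlt⟩, hstep]
          exact sfB_congr cs (i + 1) (i + 4) (by omega) (by omega) hid3
        rw [ih (i + 4) op r (by omega) (by omega), hs]
      case pos =>
      have hL2 : digitLenGoT0 cs (runEndT cs (i + 4) + 1) false =
          runEndT cs (runEndT cs (i + 4) + 1) - (runEndT cs (i + 4) + 1) + 1 := by
        rw [hdl2, if_pos hcond2]
      rw [hL2]
      rw [if_neg (show ¬ (runEndT cs (runEndT cs (i + 4) + 1) - (runEndT cs (i + 4) + 1) + 1 = 0)
        from by omega)]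
      have hid : ∀ q, i + 1 ≤ q → q < runEndT cs (runEndT cs (i + 4) + 1) + 1 →
          ∀ ts, bStep cs q ts = ts := by
        intro q hq1 hq2 ts
        by_cases hq3 : q < i + 4
        · exact hid3 q hq1 hq3 ts
        · by_cases hq4 : q < runEndT cs (i + 4)
          · have hdq := runEndT_digits cs (i + 4) q (by omega) hq4
            exact bStep_id cs q (by omega) (isdigit_ne_d _ hdq) (isdigit_ne_m _ hdq) ts
          · by_cases hq5 : q = runEndT cs (i + 4)
            · subst hq5
              exact bStep_id cs _ (by omega) (by rw [hcond1.2]; decide)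
                (by rw [hcond1.2]; decide) ts
            · by_cases hq6 : q < runEndT cs (runEndT cs (i + 4) + 1)
              · have hdq := runEndT_digits cs (runEndT cs (i + 4) + 1) q (by omega) hq6
                exact bStep_id cs q (by omega) (isdigit_ne_d _ hdq) (isdigit_ne_m _ hdq) ts
              · have hq7 : q = runEndT cs (runEndT cs (i + 4) + 1) := by omega
                subst hq7
                exact bStep_id cs _ (by omega) (by rw [hcond2.2]; decide)
                  (by rw [hcond2.2]; decide) ts
      have hs : sfB cs i =
          ((sfB cs (runEndT cs (runEndT cs (i + 4) + 1) + 1)).1,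
           (sfB cs (runEndT cs (runEndT cs (i + 4) + 1) + 1)).2 ++
             [(PySem.List.slice cs (some (i + 4)) (some (runEndT cs (i + 4))),
               PySem.List.slice cs (some (runEndT cs (i + 4) + 1))
                 (some (runEndT cs (runEndT cs (i + 4) + 1))))]) := by
        conv_lhs => rw [sfB]
        rw [if_pos ⟨hi, hlt⟩,
          ← sfB_congr cs (i + 1) (runEndT cs (runEndT cs (i + 4) + 1) + 1) (by omega) (by omega)
            hid]
        simp only [bStep]
        rw [if_neg hndo, if_neg hndont, if_pos hmul, hrE1, if_pos hcond1, hrE2, if_pos hcond2]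
      rw [show runEndT cs (i + 4) + 1 - 1 = runEndT cs (i + 4) from by ring]
      rw [show runEndT cs (i + 4) + 1 +
          (runEndT cs (runEndT cs (i + 4) + 1) - (runEndT cs (i + 4) + 1) + 1) - 1 =
          runEndT cs (runEndT cs (i + 4) + 1) from by ring]
      rw [show runEndT cs (i + 4) + 1 +
          (runEndT cs (runEndT cs (i + 4) + 1) - (runEndT cs (i + 4) + 1) + 1) =
          runEndT cs (runEndT cs (i + 4) + 1) + 1 from by ring]
      rw [ih (runEndT cs (runEndT cs (i + 4) + 1) + 1) op
        (if op = true then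
          r + (PySem.Int.ofChars?
                (PySem.List.slice cs (some (i + 4)) (some (runEndT cs (i + 4))))).getD 0 *
              (PySem.Int.ofChars?
                (PySem.List.slice cs (some (runEndT cs (i + 4) + 1))
                  (some (runEndT cs (runEndT cs (i + 4) + 1))))).getD 0
         else r) (by omega) (by omega)]
      rw [hs]
      cases op
      · simp [tvB]
      · simp [tvB, sumProd_append]
        ring
    case neg =>
      rw [if_neg hmul]
      by_cases hdo : PySem.List.slice cs (some i) (some (i + 4)) = ['d', 'o', '(', ')']
      case pos =>
        rw [if_pos hdo]
        have hdec : cs.drop i.toNat = ['d', 'o', '(', ')'] ++ cs.drop (i.toNat + 4) :=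
          lit_decomp cs i hi _ 4 (by decide) (by norm_num; exact hdo)
        have hid : ∀ q, i + 1 ≤ q → q < i + 4 → ∀ ts, bStep cs q ts = ts := by
          intro q hq1 hq2 ts
          have c1 : PySem.List.pyGetD cs (i + (1 : Nat)) ' ' = 'o' :=
            pyGetD_drop cs i hi 1 'o' _ hdec (by decide)
          have c2 : PySem.List.pyGetD cs (i + (2 : Nat)) ' ' = '(' :=
            pyGetD_drop cs i hi 2 '(' _ hdec (by decide)
          have c3 : PySem.List.pyGetD cs (i + (3 : Nat)) ' ' = ')' :=
            pyGetD_drop cs i hi 3 ')' _ hdec (by decide)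
          norm_num at c1 c2 c3
          rcases (by omega : q = i + 1 ∨ q = i + 2 ∨ q = i + 3) with h | h | h <;> subst h
          · exact bStep_id cs _ (by omega) (by rw [c1]; decide) (by rw [c1]; decide) ts
          · exact bStep_id cs _ (by omega) (by rw [c2]; decide) (by rw [c2]; decide) ts
          · exact bStep_id cs _ (by omega) (by rw [c3]; decide) (by rw [c3]; decide) ts
        have hs : sfB cs i = ((sfB cs (i + 4)).1 + sumProd (sfB cs (i + 4)).2, []) := by
          conv_lhs => rw [sfB]
          rw [if_pos ⟨hi, hlt⟩, ← sfB_congr cs (i + 1) (i + 4) (by omega) (by omega) hid]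
          simp only [bStep]
          rw [if_pos hdo]
        rw [ih (i + 4) true r (by omega) (by omega), hs, tvB_pending]
        simp [tvB]
      case neg =>
        rw [if_neg hdo]
        by_cases hdont : PySem.List.slice cs (some i) (some (i + 7)) =
            ['d', 'o', 'n', '\'', 't', '(', ')']
        case pos =>
          rw [if_pos hdont]
          have hdec : cs.drop i.toNat = ['d', 'o', 'n', '\'', 't', '(', ')'] ++
              cs.drop (i.toNat + 7) :=
            lit_decomp cs i hi _ 7 (by decide) (by norm_num; exact hdont)
          have hid : ∀ q, i + 1 ≤ q → q < i + 7 → ∀ ts, bStep cs q ts = ts := by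
            intro q hq1 hq2 ts
            have c1 : PySem.List.pyGetD cs (i + (1 : Nat)) ' ' = 'o' :=
              pyGetD_drop cs i hi 1 'o' _ hdec (by decide)
            have c2 : PySem.List.pyGetD cs (i + (2 : Nat)) ' ' = 'n' :=
              pyGetD_drop cs i hi 2 'n' _ hdec (by decide)
            have c3 : PySem.List.pyGetD cs (i + (3 : Nat)) ' ' = '\'' :=
              pyGetD_drop cs i hi 3 '\'' _ hdec (by decide)
            have c4 : PySem.List.pyGetD cs (i + (4 : Nat)) ' ' = 't' :=
              pyGetD_drop cs i hi 4 't' _ hdec (by decide)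
            have c5 : PySem.List.pyGetD cs (i + (5 : Nat)) ' ' = '(' :=
              pyGetD_drop cs i hi 5 '(' _ hdec (by decide)
            have c6 : PySem.List.pyGetD cs (i + (6 : Nat)) ' ' = ')' :=
              pyGetD_drop cs i hi 6 ')' _ hdec (by decide)
            norm_num at c1 c2 c3 c4 c5 c6
            rcases (by omega :
                q = i + 1 ∨ q = i + 2 ∨ q = i + 3 ∨ q = i + 4 ∨ q = i + 5 ∨ q = i + 6)
              with h | h | h | h | h | h <;> subst h
            · exact bStep_id cs _ (by omega) (by rw [c1]; decide) (by rw [c1]; decide) ts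
            · exact bStep_id cs _ (by omega) (by rw [c2]; decide) (by rw [c2]; decide) ts
            · exact bStep_id cs _ (by omega) (by rw [c3]; decide) (by rw [c3]; decide) ts
            · exact bStep_id cs _ (by omega) (by rw [c4]; decide) (by rw [c4]; decide) ts
            · exact bStep_id cs _ (by omega) (by rw [c5]; decide) (by rw [c5]; decide) ts
            · exact bStep_id cs _ (by omega) (by rw [c6]; decide) (by rw [c6]; decide) ts
          have hs : sfB cs i = ((sfB cs (i + 7)).1, []) := by
            conv_lhs => rw [sfB]
            rw [if_pos ⟨hi, hlt⟩, ← sfB_congr cs (i + 1) (i + 7) (by omega) (by omega) hid]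
            simp only [bStep]
            rw [if_neg hdo, if_pos hdont]
          rw [ih (i + 7) false r (by omega) (by omega), hs, tvB_pending]
          simp [tvB]
        case neg =>
          rw [if_neg hdont, ih (i + 1) op r (by omega) (by omega)]
          have hs : sfB cs i = sfB cs (i + 1) := by
            conv_lhs => rw [sfB]
            rw [if_pos ⟨hi, hlt⟩]
            simp only [bStep]
            rw [if_neg hdo, if_neg hdont, if_neg hmul]
          rw [hs]

-- ===== VERDICT (by name: the statement is the Claim_ definition above) =====
theorem ext_memory_ops_spec : Claim_equal_ext_memory_ops := by
  intro text _ _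
  unfold Spec_ext_memory_ops
  rw [alt_eq]
  show emoGo text.toList 0 true 0 (text.toList.length + 1) = _
  rw [emoGo_sfB text.toList (text.toList.length + 1) 0 true 0 le_rfl (by omega)]
  simp [tvB]
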